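-- pv_equiv track=rewrite | github.com/algorithmdatastructure/WONSEON | test1/test_4.py | criti
-- ===== SOURCE A (Python) =====
-- def criti(x) :
--
--     asc = [ord(i) for i in x] # alphabet to Ascii
--     asc.sort()
--
--     from collections import Counter # 모든 item count 할때.
--
--     if len(x)-1 == sum([a-b for a, b in zip(asc[1:], asc[:-1])]) : # 정렬된 ascii에서 바로 앞과 차를 구해서 계산
--         dup = Counter(asc)
--         if len([i for i in dup.values() if i > 1]) == 0 : # 중복된 문자 걸러주는 부분
--             return "Yes"
--         else :
--             return "No"
--     else :
--         return "No"
-- ===== SOURCE B (Python) =====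
-- def criti(x):
--     n = len(x)
--     if n == 0:
--         return "No"
--     codes = {ord(c) for c in x}
--     if len(codes) == n and max(codes) - min(codes) == n - 1:
--         return "Yes"
--     return "No"
-- ===== Notes on version B (the rewrite author's own statement) =====
-- stated objective: faster
-- what changed: B drops A's sort, adjacent-difference sum and Counter scan, and instead builds the set of character codes once and checks len(set)==n and max-min==n-1 (the telescoping value of A's sum).
import Mathlib
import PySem

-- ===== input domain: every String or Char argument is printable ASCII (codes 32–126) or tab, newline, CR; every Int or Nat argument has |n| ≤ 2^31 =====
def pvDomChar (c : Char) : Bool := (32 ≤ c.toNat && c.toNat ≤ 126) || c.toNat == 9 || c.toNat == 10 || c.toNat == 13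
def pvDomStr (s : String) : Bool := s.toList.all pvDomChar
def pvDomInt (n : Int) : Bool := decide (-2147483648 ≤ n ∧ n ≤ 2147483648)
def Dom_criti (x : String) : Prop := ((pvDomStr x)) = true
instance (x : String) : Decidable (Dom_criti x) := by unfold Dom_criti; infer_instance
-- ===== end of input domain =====

-- B replaces A's sort + adjacent-difference sum + Counter scan by a single set of codes
-- with min/max: an O(n) pass instead of O(n log n) sorting. Return-value equivalence only.

-- ===== PORT A =====
def criti (x : String) : String :=
  let asc := PySem.List.sorted (x.toList.map (fun c => (c.toNat : Int))) (fun v => v) false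
  if PySem.Str.len x - 1 =
      (((PySem.List.slice asc (some 1) none).zip (PySem.List.slice asc none (some (-1)))).map
        (fun p => p.1 - p.2)).sum then
    let dup := PySem.Dict.counter asc
    if ((dup.values.filter (fun i => decide (1 < i))).length : Int) = 0 then "Yes" else "No"
  else "No"

-- ===== PORT B =====
def criti_alt (x : String) : String :=
  let n : Int := PySem.Str.len x
  if n = 0 then "No"
  else
    let codes := PySem.Set.ofList (x.toList.map (fun c => (c.toNat : Int)))
    match PySem.List.max? codes (fun v => v), PySem.List.min? codes (fun v => v) with
    | some hi, some lo =>
        if (PySem.Set.len codes : Int) = n ∧ hi - lo = n - 1 then "Yes" else "No"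
    | _, _ => "No"  -- unreachable: codes is nonempty when n ≠ 0

-- ===== PRECONDITION & SPEC =====
def Spec_criti (x : String) (out : String) : Prop := out = criti_alt x
instance (x : String) (out : String) : Decidable (Spec_criti x out) := by unfold Spec_criti; infer_instance

-- ===== CLAIM (what is proved, stated in full; the proofs are below) =====
def Claim_equal_criti : Prop := ∀ (x : String), Dom_criti x → Spec_criti x (criti x)

-- ===== LEMMAS AND PROOFS =====

theorem pv_tele (l : List Int) (a : Int) :
    ((l.zip (a :: l).dropLast).map (fun p => p.1 - p.2)).sum =
      (a :: l).getLast (by simp) - a := by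
  induction l generalizing a with
  | nil => simp
  | cons b t ih =>
    have hd : (a :: b :: t).dropLast = a :: (b :: t).dropLast := by
      simp [List.dropLast_cons_of_ne_nil]
    rw [hd]
    simp only [List.zip_cons_cons, List.map_cons, List.sum_cons, ih b]
    have : (a :: b :: t).getLast (by simp) = (b :: t).getLast (by simp) := by
      simp [List.getLast_cons]
    omega

theorem pv_le_getLast (l : List Int) (h : l.Pairwise (· ≤ ·)) (hne : l ≠ []) (a : Int) (ha : a ∈ l) :
    a ≤ l.getLast hne := by
  induction l with
  | nil => simp at ha
  | cons b t ih =>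
    rcases List.mem_cons.mp ha with rfl | ht
    · cases t with
      | nil => simp
      | cons c u =>
        rw [List.getLast_cons (by simp)]
        exact List.rel_of_pairwise_cons h (List.getLast_mem _)
    · have hne' : t ≠ [] := by rintro rfl; simp at ht
      rw [List.getLast_cons hne']
      exact ih (List.Pairwise.of_cons h) hne' ht

theorem pv_nodup_of_len (l : List Int) (h : (PySem.Set.ofList l).length = l.length) : l.Nodup := by
  have hperm : (PySem.Set.ofList l).Perm l.dedup := by
    apply (List.perm_ext_iff_of_nodup (PySem.Set.nodup_ofList l) (List.nodup_dedup l)).mpr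
    intro a; rw [PySem.Set.mem_ofList, List.mem_dedup]
  have hlen : l.dedup.length = l.length := by rw [← hperm.length_eq, h]
  have := List.Sublist.eq_of_length (List.dedup_sublist l) hlen
  exact this ▸ List.nodup_dedup l

theorem criti_eq (x : String) : criti x = criti_alt x := by
  by_cases hx : x.toList = []
  · rw [String.toList_eq_nil_iff.mp hx]; decide
  · unfold criti criti_alt
    set cs := x.toList.map (fun c => (c.toNat : Int)) with hcs
    have hcsne : cs ≠ [] := by simpa [hcs] using hx
    cases hasc : PySem.List.sorted cs (fun v => v) false with
    | nil => exact absurd (PySem.List.sorted_eq_nil_iff cs _ false |>.mp hasc) hcsne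
    | cons m t =>
      have hperm : (m :: t).Perm cs := hasc ▸ PySem.List.sorted_perm cs (fun v => v) false
      have hlen2 : (m :: t).length = cs.length := hperm.length_eq
      have hn0 : (cs.length : Int) ≠ 0 := by
        have : 0 < cs.length := List.length_pos_iff.mpr hcsne
        omega
      have hpw : (m :: t).Pairwise (· ≤ ·) := by
        have := PySem.List.sorted_pairwise cs (fun v => v) (κ := Int)
        rw [hasc] at this; exact this
      have hm_min : ∀ y ∈ cs, m ≤ y := by
        have := PySem.List.key_head_sorted_le (key := fun v => v) (xs := cs) hasc
        simpa using this
      have hM_max : ∀ y ∈ cs, y ≤ (m :: t).getLast (by simp) := by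
        intro y hy
        exact pv_le_getLast _ hpw (by simp) y (hperm.mem_iff.mpr hy)
      have hMmem : (m :: t).getLast (by simp) ∈ cs := hperm.mem_iff.mp (List.getLast_mem _)
      have hmmem : m ∈ cs := hperm.mem_iff.mp (by simp)
      have hcodne : PySem.Set.ofList cs ≠ [] := by
        intro h0
        have := (PySem.Set.mem_ofList (y := m) (xs := cs)).mpr hmmem
        rw [h0] at this; simp at this
      -- max? and min? of the set of codes
      cases hmax : PySem.List.max? (PySem.Set.ofList cs) (fun v => v) with
      | none => exact absurd ((PySem.List.max?_eq_none_iff _ _).mp hmax) hcodne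
      | some hi =>
      cases hmin : PySem.List.min? (PySem.Set.ofList cs) (fun v => v) with
      | none => exact absurd ((PySem.List.min?_eq_none_iff _ _).mp hmin) hcodne
      | some lo =>
      have hhi : hi = (m :: t).getLast (by simp) := by
        have h1 : hi ∈ cs := (PySem.Set.mem_ofList _ _).mp (PySem.List.max?_mem hmax)
        have h2 := PySem.List.max?_isMax hmax ((m :: t).getLast (by simp))
          ((PySem.Set.mem_ofList _ _).mpr hMmem)
        exact le_antisymm (hM_max hi h1) h2
      have hlo : lo = m := by
        have h1 : lo ∈ cs := (PySem.Set.mem_ofList _ _).mp (PySem.List.min?_mem hmin)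
        have h2 := PySem.List.min?_isMin hmin m ((PySem.Set.mem_ofList _ _).mpr hmmem)
        exact le_antisymm h2 (hm_min lo h1)
      have hlenx : PySem.Str.len x = (cs.length : Int) := by
        simp [PySem.Str.len_eq, hcs]
      have hval : ((PySem.Dict.counter (m :: t)).values) =
          (PySem.Set.ofList (m :: t)).map (fun k => (((m :: t).count k : Nat) : Int)) := by
        simp [PySem.Dict.values, PySem.Dict.items_counter, List.map_map, Function.comp]
      have hA2 : ((((PySem.Dict.counter (m :: t)).values).filter
          (fun i => decide (1 < i))).length : Int) = 0 ↔ cs.Nodup := by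
        rw [hval, Nat.cast_eq_zero, List.length_eq_zero_iff, List.filter_eq_nil_iff,
          ← hperm.nodup_iff]
        constructor
        · intro h
          rw [List.nodup_iff_count_le_one]
          intro a
          by_cases ha : a ∈ (m :: t)
          · have := h ((((m :: t).count a : Nat)) : Int)
              (List.mem_map_of_mem ((PySem.Set.mem_ofList _ _).mpr ha))
            simp only [decide_eq_true_eq, not_lt] at this
            exact_mod_cast this
          · simp [List.count_eq_zero_of_not_mem ha]
        · intro h y hy
          obtain ⟨k, hk, rfl⟩ := List.mem_map.mp hy
          have := List.nodup_iff_count_le_one.mp h k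
          simp only [decide_eq_true_eq, not_lt]
          exact_mod_cast this
      have hB2 : PySem.Set.len (PySem.Set.ofList cs) = (cs.length : Int) ↔ cs.Nodup := by
        simp only [PySem.Set.len, Nat.cast_inj]
        constructor
        · exact pv_nodup_of_len cs
        · intro h
          rw [PySem.Set.ofList_eq_self_of_nodup cs h]
      simp only [PySem.List.slice_from_one, PySem.List.slice_to_neg_one, List.tail_cons]
      simp only [hmax, hmin]
      rw [pv_tele t m, hlenx, hhi, hlo, if_neg hn0]
      split_ifs with h1 h2 h3 h4 h5
      · rfl
      · exact absurd ⟨hB2.mpr (hA2.mp h2), by omega⟩ h3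
      · exact absurd (hA2.mpr (hB2.mp h4.1)) h2
      · rfl
      · exact absurd h5.2.symm h1
      · rfl

-- ===== VERDICT (by name: the statement is the Claim_ definition above) =====
theorem criti_spec : Claim_equal_criti := by
  intro x _
  unfold Spec_criti
  exact criti_eq x
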